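-- pv_equiv track=rewrite | github.com/mdandre89/Codewars-exercises | number-9-matrices-adding-diagonal-products/number-9-matrices-adding-diagonal-products.py | sum_prod_diags
-- ===== SOURCE A (Python) =====
-- from functools import reduce
--
-- def sum_prod_diags(matrix):
-- #   this one helped me out https://www.codewars.com/kata/5592dd43a9cd0e43a800019e/python
--     l = len(matrix)
--     if l == 1:
--         return matrix[0]
--     right =  [[ matrix[j][ (i + j)] for j in range(l-i)] for i in range(l)]
--     right1 = [[ matrix[i+j][j] for j in range(l-i)] for i in range(1,l)]
--     left =   [[ matrix[j][ l-j-1-i] for j in range(l-i)] for i in range(l)]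
--     left1 =  [[ matrix[i+j][l-j-1] for j in range(l-i)] for i in range(1,l)]
--
--     s_r = [reduce(lambda x, y: x * y, diag, 1) for diag in right]
--     s_r1 = [reduce(lambda x, y: x * y, diag, 1) for diag in right1]
--     s_l = [reduce(lambda x, y: x * y, diag, 1) for diag in left]
--     s_l1 = [reduce(lambda x, y: x * y, diag, 1) for diag in left1]
--
--     return sum(s_r) + sum(s_r1) - sum(s_l) - sum(s_l1)
-- ===== SOURCE B (Python) =====
-- def sum_prod_diags(matrix):
--     l = len(matrix)
--     if l == 1:
--         return matrix[0]
--     total = 0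
--     for d in range(1 - l, l):          # '\' diagonals keyed by row - col
--         p = 1
--         for i in range(max(d, 0), min(l, l + d)):
--             p *= matrix[i][i - d]
--         total += p
--     for s in range(2 * l - 1):         # '/' diagonals keyed by row + col
--         p = 1
--         for i in range(max(0, s - l + 1), min(l, s + 1)):
--             p *= matrix[i][s - i]
--         total -= p
--     return total
-- ===== Notes on version B (the rewrite author's own statement) =====
-- stated objective: simpler
-- what changed: Instead of building four explicit lists of diagonal lists and reducing each, B enumerates diagonals by their index key (row-col for one direction, row+col for the other) and keeps a running product and running total, building no intermediate lists.
-- outside the precondition, e.g. on sum_prod_diags([[5]]): A returns [5], B returns [5]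
import Mathlib
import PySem

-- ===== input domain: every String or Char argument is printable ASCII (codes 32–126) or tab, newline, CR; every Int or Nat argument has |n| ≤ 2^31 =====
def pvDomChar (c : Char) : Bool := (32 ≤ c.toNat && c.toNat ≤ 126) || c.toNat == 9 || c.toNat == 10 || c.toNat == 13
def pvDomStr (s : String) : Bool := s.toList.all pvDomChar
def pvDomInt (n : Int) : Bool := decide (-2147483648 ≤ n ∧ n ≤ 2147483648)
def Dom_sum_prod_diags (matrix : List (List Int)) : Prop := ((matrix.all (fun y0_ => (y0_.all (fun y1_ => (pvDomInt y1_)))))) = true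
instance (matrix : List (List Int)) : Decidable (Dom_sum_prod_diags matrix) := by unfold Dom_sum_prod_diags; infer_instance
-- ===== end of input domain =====

-- B replaces A's four explicit diagonal-list comprehensions by two loops over the
-- diagonal index keys (row-col and row+col) with running products — simpler, no
-- intermediate lists.  Equivalence is about the RETURN value on Pre_ (which excludes
-- the len==1 case, where the Python returns a list, not an int).

-- shared cell accessor: matrix[r][c] (both Pythons index the same way; raise = out of Pre_)
def pvCell (matrix : List (List Int)) (r c : Int) : Int :=
  PySem.List.pyGetD (PySem.List.pyGetD matrix r []) c 0

-- ===== PORT A =====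
def sum_prod_diags (matrix : List (List Int)) : Int :=
  let l : Int := matrix.length
  if l == 1 then
    0  -- Python returns matrix[0] (a LIST, not an int); outside Pre_, value unused
  else
    let right  := (PySem.List.pyRange 0 l 1).map (fun i =>
      (PySem.List.pyRange 0 (l - i) 1).map (fun j => pvCell matrix j (i + j)))
    let right1 := (PySem.List.pyRange 1 l 1).map (fun i =>
      (PySem.List.pyRange 0 (l - i) 1).map (fun j => pvCell matrix (i + j) j))
    let left   := (PySem.List.pyRange 0 l 1).map (fun i =>
      (PySem.List.pyRange 0 (l - i) 1).map (fun j => pvCell matrix j (l - j - 1 - i)))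
    let left1  := (PySem.List.pyRange 1 l 1).map (fun i =>
      (PySem.List.pyRange 0 (l - i) 1).map (fun j => pvCell matrix (i + j) (l - j - 1)))
    let s_r  := right.map  (fun diag => diag.foldl (fun x y => x * y) 1)
    let s_r1 := right1.map (fun diag => diag.foldl (fun x y => x * y) 1)
    let s_l  := left.map   (fun diag => diag.foldl (fun x y => x * y) 1)
    let s_l1 := left1.map  (fun diag => diag.foldl (fun x y => x * y) 1)
    s_r.sum + s_r1.sum - s_l.sum - s_l1.sum

-- ===== PORT B =====
def sum_prod_diags_alt (matrix : List (List Int)) : Int :=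
  let l : Int := matrix.length
  if l == 1 then
    0  -- same excluded case as in A (B's Python also returns matrix[0] there)
  else
    let t1 := (PySem.List.pyRange (1 - l) l 1).foldl (fun total d =>
      total + (PySem.List.pyRange (max d 0) (min l (l + d)) 1).foldl
        (fun p i => p * pvCell matrix i (i - d)) 1) 0
    (PySem.List.pyRange 0 (2 * l - 1) 1).foldl (fun total s =>
      total - (PySem.List.pyRange (max 0 (s - l + 1)) (min l (s + 1)) 1).foldl
        (fun p i => p * pvCell matrix i (s - i)) 1) t1

-- ===== PRECONDITION & SPEC =====
-- Pre_ excludes (1) matrices with exactly one row, where A returns matrix[0] — a list,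
-- not a value of the declared Int type — and (2) matrices with a row shorter than the
-- number of rows, where A raises IndexError.
def Pre_sum_prod_diags (matrix : List (List Int)) : Prop :=
  matrix.length ≠ 1 ∧ ∀ row ∈ matrix, matrix.length ≤ row.length
instance (matrix : List (List Int)) : Decidable (Pre_sum_prod_diags matrix) := by
  unfold Pre_sum_prod_diags; infer_instance
def pvWitness_sum_prod_diags : List (List Int) := [[1, 2], [3, 4]]

def Spec_sum_prod_diags (matrix : List (List Int)) (out : Int) : Prop := out = sum_prod_diags_alt matrix
instance (matrix : List (List Int)) (out : Int) : Decidable (Spec_sum_prod_diags matrix out) := by unfold Spec_sum_prod_diags; infer_instance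

-- ===== CLAIM (what is proved, stated in full; the proofs are below) =====
def Claim_equal_sum_prod_diags : Prop := ∀ (matrix : List (List Int)), Dom_sum_prod_diags matrix → Pre_sum_prod_diags matrix → Spec_sum_prod_diags matrix (sum_prod_diags matrix)

-- ===== LEMMAS AND PROOFS =====

-- helper: congruence for the cell accessor (arguments proved equal by omega at each use)
theorem pvCell_congr (m : List (List Int)) {r r' c c' : Int} (hr : r = r') (hc : c = c') :
    pvCell m r c = pvCell m r' c' := by rw [hr, hc]

-- a foldl product of f over a range is the product of the mapped range
theorem pvFoldlMulMap (f : Int → Int) (lst : List Int) :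
    lst.foldl (fun p i => p * f i) 1 = (lst.map f).prod := by
  rw [← List.foldl_map]; exact List.prod_eq_foldl.symm

-- A's reduce(lambda x, y: x * y, diag, 1) is diag.prod
theorem pvFoldlMul (lst : List Int) : lst.foldl (fun x y => x * y) 1 = lst.prod :=
  List.prod_eq_foldl.symm

-- 'total -= g x' loop
theorem pvFoldlSub (lst : List Int) (g : Int → Int) (a : Int) :
    lst.foldl (fun acc x => acc - g x) a = a - (lst.map g).sum := by
  induction lst generalizing a with
  | nil => simp
  | cons x xs ih => simp [List.foldl_cons, ih]; ring

-- bridge: a mapped-range list sum is a Finset.range sum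
theorem pvSumList (n : ℕ) (f : ℕ → ℤ) :
    ((List.range n).map f).sum = ∑ i ∈ Finset.range n, f i := by
  induction n with
  | zero => simp
  | succ k ih => rw [List.range_succ, Finset.sum_range_succ, List.map_append, List.sum_append, ih]; simp

-- two ranges of equal length, pointwise-equal images: equal mapped lists
theorem pvListShift (F G : Int → Int) (a b a' b' : ℤ) (hab : b - a = b' - a')
    (h : ∀ t : ℕ, (t : ℤ) < b - a → F (a + t) = G (a' + t)) :
    (PySem.List.pyRange a b 1).map F = (PySem.List.pyRange a' b' 1).map G := by
  rw [PySem.List.pyRange_one, PySem.List.pyRange_one, List.map_map, List.map_map, hab]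
  apply List.map_congr_left
  intro k hk
  simp only [List.mem_range] at hk
  simpa using h k (by omega)

theorem pvCellArg (G : Int → Int) {x y : Int} (h : x = y) : G x = G y := congrArg G h

-- two ranges of equal length whose images match in reversed order: equal sums
theorem pvSumReflect (F G : Int → Int) (a b a' b' : ℤ) (hab : b - a = b' - a')
    (h : ∀ t : ℕ, (t : ℤ) < b - a → F (a + t) = G (a' + (b - a - 1 - t))) :
    ((PySem.List.pyRange a b 1).map F).sum = ((PySem.List.pyRange a' b' 1).map G).sum := by
  rw [PySem.List.pyRange_one, PySem.List.pyRange_one, List.map_map, List.map_map, hab,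
      pvSumList, pvSumList]
  rw [← Finset.sum_range_reflect (fun j => (F ∘ fun k : ℕ => a + (k : ℤ)) j) ((b' - a').toNat)]
  apply Finset.sum_congr rfl
  intro j hj
  simp only [Finset.mem_range] at hj
  simp only [Function.comp]
  calc F (a + ((b' - a').toNat - 1 - j : ℕ)) = G (a' + (b - a - 1 - ((b' - a').toNat - 1 - j : ℕ))) :=
        h _ (by omega)
    _ = G (a' + j) := pvCellArg G (by omega)

-- the main equivalence, for any matrix with ≠ 1 rows (row lengths are irrelevant
-- to the equality: both ports read exactly the same cells with the same defaults)
theorem pvMain (m : List (List Int)) (h1 : m.length ≠ 1) :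
    sum_prod_diags m = sum_prod_diags_alt m := by
  rcases Nat.eq_zero_or_pos m.length with h0 | hpos
  · have hm : m = [] := List.length_eq_zero_iff.mp h0
    subst hm; rfl
  · have h2 : 2 ≤ m.length := by omega
    have hc : (((m.length : Int)) == 1) = false := by simp; omega
    unfold sum_prod_diags sum_prod_diags_alt
    simp only [hc, Bool.false_eq_true, if_false, pvFoldlMul, pvFoldlMulMap, List.map_map,
      Function.comp_def, PySem.List.foldl_add, pvFoldlSub, zero_add]
    rw [PySem.List.pyRange_one_append (1 - (m.length:ℤ)) 1 (m.length:ℤ) (by omega) (by omega),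
        PySem.List.pyRange_one_append 0 (m.length:ℤ) (2 * (m.length:ℤ) - 1) (by omega) (by omega),
        List.map_append, List.map_append, List.sum_append, List.sum_append, sub_sub]
    congr 1
    · -- '\\' diagonals: d ≤ 0 part matches A's `right` reversed; d ≥ 1 part matches `right1`
      congr 1
      · refine (pvSumReflect _ _ _ _ _ _ ?_ ?_).symm
        · omega
        · intro t ht
          beta_reduce
          rw [max_eq_right (by omega), min_eq_right (by omega)]
          refine congrArg List.prod (pvListShift _ _ _ _ _ _ ?_ ?_)
          · omega
          · intro t' ht'
            beta_reduce
            exact pvCell_congr m (by omega) (by omega)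
      · refine (congrArg List.sum (pvListShift _ _ _ _ _ _ ?_ ?_)).symm
        · omega
        · intro t ht
          beta_reduce
          rw [max_eq_left (by omega), min_eq_left (by omega)]
          refine congrArg List.prod (pvListShift _ _ _ _ _ _ ?_ ?_)
          · omega
          · intro t' ht'
            beta_reduce
            exact pvCell_congr m (by omega) (by omega)
    · -- '/' diagonals: s ≤ l-1 part matches A's `left` reversed; s ≥ l part matches `left1`
      congr 1
      · refine (pvSumReflect _ _ _ _ _ _ ?_ ?_).symm
        · omega
        · intro t ht
          beta_reduce
          rw [max_eq_left (by omega), min_eq_right (by omega)]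
          refine congrArg List.prod (pvListShift _ _ _ _ _ _ ?_ ?_)
          · omega
          · intro t' ht'
            beta_reduce
            exact pvCell_congr m (by omega) (by omega)
      · refine (congrArg List.sum (pvListShift _ _ _ _ _ _ ?_ ?_)).symm
        · omega
        · intro t ht
          beta_reduce
          rw [max_eq_right (by omega), min_eq_left (by omega)]
          refine congrArg List.prod (pvListShift _ _ _ _ _ _ ?_ ?_)
          · omega
          · intro t' ht'
            beta_reduce
            exact pvCell_congr m (by omega) (by omega)


-- ===== VERDICT (by name: the statement is the Claim_ definition above) =====
theorem sum_prod_diags_spec : Claim_equal_sum_prod_diags := by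
  intro m _ hpre
  exact pvMain m hpre.1
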